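-- pv_equiv track=rewrite | github.com/Joel-tec26/IntroduccionProgra | python/examen1.py | multiplicarDig
-- ===== SOURCE A (Python) =====
-- def multiplicarDig (num1, num2):
--     """
--     Funcionalidad: Multiplica los dígitos de num1 y num2 posición por posición
--     Entradas:
--     -num1(int): frase númerica 1 a valorar
--     -num2(int): frase númerica 2 a valorar
--     Salidas:
--     -resultado (int): Valor compuesto por los residuos de las multiplicaciones individuales
--     """
--     cont=0
--     resultado=0
--     while num1>0 and num2>0:
--         temp1=num1%10
--         temp2=num2%10
--         multiplicacion=temp1*temp2
--         resultado=((multiplicacion%10)*10**cont)+resultado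
--         num1//=10
--         num2//=10
--         cont+=1
--     return resultado
-- ===== SOURCE B (Python) =====
-- def multiplicarDig(num1, num2):
--     """Staged-pass re-implementation: extract digit lists, zip, map, then one Horner fold."""
--     def digits(n):
--         ds = []
--         while n > 0:
--             ds.append(n % 10)
--             n //= 10
--         return ds
--     prods = [(a * b) % 10 for a, b in zip(digits(num1), digits(num2))]
--     resultado = 0
--     for d in reversed(prods):
--         resultado = resultado * 10 + d
--     return resultado
-- ===== Notes on version B (the rewrite author's own statement) =====
-- stated objective: alternative
-- what changed: Replaces A's single while loop with counter and 10**cont accumulator by staged passes: build both digit lists, zip and map (a*b)%10, then assemble the result with one Horner fold over the reversed products.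
import Mathlib
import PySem

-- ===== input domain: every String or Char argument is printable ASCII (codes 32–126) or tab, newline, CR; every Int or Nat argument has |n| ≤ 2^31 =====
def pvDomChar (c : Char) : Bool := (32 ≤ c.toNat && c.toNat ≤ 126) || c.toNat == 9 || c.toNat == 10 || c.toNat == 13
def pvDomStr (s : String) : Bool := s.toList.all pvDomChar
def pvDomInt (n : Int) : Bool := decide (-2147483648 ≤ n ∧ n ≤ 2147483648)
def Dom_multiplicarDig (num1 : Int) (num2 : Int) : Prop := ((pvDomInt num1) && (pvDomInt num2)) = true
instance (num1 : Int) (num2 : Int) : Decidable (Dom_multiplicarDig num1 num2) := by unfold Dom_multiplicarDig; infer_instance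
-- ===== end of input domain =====

-- B replaces A's while loop (counter cont, power 10**cont, running accumulator) by staged
-- passes: digit-list extraction, zip+map of (a*b)%10, and one Horner fold; same cost, alternative structure.


-- ===== PORT A =====
-- the while loop of A, state (num1, num2, cont, resultado)
def multiplicarDigLoop (num1 : Int) (num2 : Int) (cont : Nat) (resultado : Int) : Int :=
  if h : num1 > 0 ∧ num2 > 0 then
    multiplicarDigLoop (PySem.Int.floordiv num1 10) (PySem.Int.floordiv num2 10) (cont + 1)
      (PySem.Int.mod (PySem.Int.mod num1 10 * PySem.Int.mod num2 10) 10 * 10 ^ cont + resultado)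
  else resultado
termination_by num1.toNat
decreasing_by
  have h10 : PySem.Int.floordiv num1 10 = num1 / 10 := PySem.Int.floordiv_eq_ediv_of_pos (by omega)
  rw [h10]; omega

def multiplicarDig (num1 : Int) (num2 : Int) : Int :=
  multiplicarDigLoop num1 num2 0 0

-- ===== PORT B =====
-- Source B's digits(): least-significant-first digit list
def digitsB (n : Int) : List Int :=
  if h : n > 0 then PySem.Int.mod n 10 :: digitsB (PySem.Int.floordiv n 10) else []
termination_by n.toNat
decreasing_by
  have h10 : PySem.Int.floordiv n 10 = n / 10 := PySem.Int.floordiv_eq_ediv_of_pos (by omega)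
  rw [h10]; omega

def multiplicarDig_alt (num1 : Int) (num2 : Int) : Int :=
  let prods := ((digitsB num1).zip (digitsB num2)).map (fun p => PySem.Int.mod (p.1 * p.2) 10)
  prods.reverse.foldl (fun resultado d => resultado * 10 + d) 0

-- ===== PRECONDITION & SPEC =====
def Spec_multiplicarDig (num1 : Int) (num2 : Int) (out : Int) : Prop := out = multiplicarDig_alt num1 num2
instance (num1 : Int) (num2 : Int) (out : Int) : Decidable (Spec_multiplicarDig num1 num2 out) := by unfold Spec_multiplicarDig; infer_instance

-- ===== CLAIM (what is proved, stated in full; the proofs are below) =====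
def Claim_equal_multiplicarDig : Prop := ∀ (num1 : Int) (num2 : Int), Dom_multiplicarDig num1 num2 → Spec_multiplicarDig num1 num2 (multiplicarDig num1 num2)

-- ===== LEMMAS AND PROOFS =====

-- lsb-first value of a digit list (foldr form of B's reversed foldl)
def pvVal (l : List Int) : Int := l.foldr (fun d acc => acc * 10 + d) 0

theorem digitsB_pos {n : Int} (h : n > 0) :
    digitsB n = PySem.Int.mod n 10 :: digitsB (PySem.Int.floordiv n 10) := by
  rw [digitsB, dif_pos h]

theorem digitsB_nonpos {n : Int} (h : ¬ n > 0) : digitsB n = [] := by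
  rw [digitsB, dif_neg h]

theorem alt_eq_val (num1 num2 : Int) :
    multiplicarDig_alt num1 num2
      = pvVal (((digitsB num1).zip (digitsB num2)).map (fun p => PySem.Int.mod (p.1 * p.2) 10)) := by
  simp [multiplicarDig_alt, pvVal, List.foldl_reverse]

-- loop invariant: A's loop computes resultado + 10^cont * (B's value)
theorem multiplicarDigLoop_eq (num1 : Int) (num2 : Int) (cont : Nat) (resultado : Int) :
    multiplicarDigLoop num1 num2 cont resultado
      = resultado + 10 ^ cont *
          pvVal (((digitsB num1).zip (digitsB num2)).map (fun p => PySem.Int.mod (p.1 * p.2) 10)) := by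
  fun_induction multiplicarDigLoop num1 num2 cont resultado with
  | case1 n1 n2 c r h ih =>
    rw [ih, digitsB_pos h.1, digitsB_pos h.2]
    simp only [List.zip_cons_cons, List.map_cons, pvVal, List.foldr_cons]
    ring
  | case2 n1 n2 c r h =>
    rcases not_and_or.mp h with h1 | h1
    · rw [digitsB_nonpos h1]; simp [pvVal]
    · rw [digitsB_nonpos h1]; simp [pvVal]

-- ===== VERDICT (by name: the statement is the Claim_ definition above) =====
theorem multiplicarDig_spec : Claim_equal_multiplicarDig := by
  intro num1 num2 _
  unfold Spec_multiplicarDig multiplicarDig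
  rw [multiplicarDigLoop_eq, alt_eq_val]
  ring
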